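-- pv_equiv track=rewrite | github.com/DushnoAndTochka/solutions_algorithmic_problems | solutions/remove_colored_pieces_if_both_neighbors_are_the_same_color/solution/solution.py | winner_of_game
-- ===== SOURCE A (Python) =====
-- def winner_of_game(colors: str) -> bool:
--     a_cnt = b_cnt = res_a = res_b = 0
--
--     for color in colors:
--         if color == "A":
--             a_cnt += 1
--             if b_cnt > 2:
--                 res_b += b_cnt - 2
--             b_cnt = 0
--         else:
--             b_cnt += 1
--             if a_cnt > 2:
--                 res_a += a_cnt - 2
--             a_cnt = 0
--
--     if b_cnt > 2:
--         res_b += b_cnt - 2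
--     if a_cnt > 2:
--         res_a += a_cnt - 2
--
--     return res_a > res_b
-- ===== SOURCE B (Python) =====
-- def winner_of_game(colors: str) -> bool:
--     # Count overlapping length-3 windows: an all-'A' window is one removable piece
--     # for Alice; a window with no 'A' at all is one removable piece for Bob.
--     res_a = res_b = 0
--     for x, y, z in zip(colors, colors[1:], colors[2:]):
--         if x == y == z == "A":
--             res_a += 1
--         elif x != "A" and y != "A" and z != "A":
--             res_b += 1
--     return res_a > res_b
-- ===== Notes on version B (the rewrite author's own statement) =====
-- stated objective: alternative
-- what changed: B counts overlapping length-3 windows (all-'A' windows are Alice's removable pieces, windows with no 'A' are Bob's) via zip of three shifted views, instead of A's two run-length counters with inline resets and a post-loop flush.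
import Mathlib
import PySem

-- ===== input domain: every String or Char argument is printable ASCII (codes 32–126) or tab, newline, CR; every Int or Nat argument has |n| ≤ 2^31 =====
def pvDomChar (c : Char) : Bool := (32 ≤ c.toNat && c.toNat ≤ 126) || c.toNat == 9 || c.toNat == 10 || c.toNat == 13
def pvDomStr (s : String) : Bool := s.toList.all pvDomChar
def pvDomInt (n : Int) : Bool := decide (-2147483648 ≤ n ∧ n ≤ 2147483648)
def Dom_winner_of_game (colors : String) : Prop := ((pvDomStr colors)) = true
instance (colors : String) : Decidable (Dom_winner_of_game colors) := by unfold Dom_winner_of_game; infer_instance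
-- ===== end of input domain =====

-- B counts overlapping length-3 windows (all-'A' → Alice, no 'A' → Bob) instead of A's
-- run-length counters with resets and a final flush; same cost, different algorithm.

-- ===== PORT A =====
-- state: (a_cnt, b_cnt, res_a, res_b)
def winnerStepA (s : Int × Int × Int × Int) (color : Char) : Int × Int × Int × Int :=
  let (a_cnt, b_cnt, res_a, res_b) := s
  if color = 'A' then
    (a_cnt + 1, 0, res_a, if b_cnt > 2 then res_b + (b_cnt - 2) else res_b)
  else
    (0, b_cnt + 1, if a_cnt > 2 then res_a + (a_cnt - 2) else res_a, res_b)

def winner_of_game (colors : String) : Bool :=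
  let st := colors.toList.foldl winnerStepA (0, 0, 0, 0)
  let res_b := if st.2.1 > 2 then st.2.2.2 + (st.2.1 - 2) else st.2.2.2
  let res_a := if st.1 > 2 then st.2.2.1 + (st.1 - 2) else st.2.2.1
  decide (res_a > res_b)

-- ===== PORT B =====
-- one zipped triple ((x, y), z) = one overlapping window of length 3
def winnerStepB (s : Int × Int) (w : (Char × Char) × Char) : Int × Int :=
  let ((x, y), z) := w
  if x = 'A' ∧ y = 'A' ∧ z = 'A' then (s.1 + 1, s.2)
  else if ¬x = 'A' ∧ ¬y = 'A' ∧ ¬z = 'A' then (s.1, s.2 + 1)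
  else s

def winner_of_game_alt (colors : String) : Bool :=
  let l := colors.toList
  let st := ((l.zip (l.drop 1)).zip (l.drop 2)).foldl winnerStepB (0, 0)
  decide (st.1 > st.2)

-- ===== PRECONDITION & SPEC =====
def Spec_winner_of_game (colors : String) (out : Bool) : Prop := out = winner_of_game_alt colors
instance (colors : String) (out : Bool) : Decidable (Spec_winner_of_game colors out) := by unfold Spec_winner_of_game; infer_instance

-- ===== CLAIM (what is proved, stated in full; the proofs are below) =====
def Claim_equal_winner_of_game : Prop := ∀ (colors : String), Dom_winner_of_game colors → Spec_winner_of_game colors (winner_of_game colors)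

-- ===== LEMMAS AND PROOFS =====

-- window counts for a continuation l, given the current trailing-run lengths
def wA : List Char → Int → Int
  | [], _ => 0
  | c :: t, a => if c = 'A' then (if 2 ≤ a then 1 else 0) + wA t (a + 1) else wA t 0

def wB : List Char → Int → Int
  | [], _ => 0
  | c :: t, b => if c = 'A' then wB t 0 else (if 2 ≤ b then 1 else 0) + wB t (b + 1)

theorem wA_ge2 (t : List Char) : ∀ a a', 2 ≤ a → 2 ≤ a' → wA t a = wA t a' := by
  induction t with
  | nil => intros; rfl
  | cons c t ih =>
      intro a a' ha ha'
      simp only [wA]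
      by_cases h : c = 'A' <;> simp [h, ha, ha', ih (a + 1) (a' + 1) (by omega) (by omega)]

theorem wB_ge2 (t : List Char) : ∀ b b', 2 ≤ b → 2 ≤ b' → wB t b = wB t b' := by
  induction t with
  | nil => intros; rfl
  | cons c t ih =>
      intro b b' hb hb'
      simp only [wB]
      by_cases h : c = 'A' <;> simp [h, hb, hb', ih (b + 1) (b' + 1) (by omega) (by omega)]

-- A's loop invariant: the (eventually flushed) counters follow the window counts
theorem foldA_inv (l : List Char) : ∀ a b ra rb,
    (l.foldl winnerStepA (a, b, ra, rb)).2.2.1 + max ((l.foldl winnerStepA (a, b, ra, rb)).1 - 2) 0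
      = ra + max (a - 2) 0 + wA l a ∧
    (l.foldl winnerStepA (a, b, ra, rb)).2.2.2 + max ((l.foldl winnerStepA (a, b, ra, rb)).2.1 - 2) 0
      = rb + max (b - 2) 0 + wB l b := by
  induction l with
  | nil => intro a b ra rb; simp [wA, wB]
  | cons c t ih =>
      intro a b ra rb
      by_cases h : c = 'A'
      · subst h
        have hstep : winnerStepA (a, b, ra, rb) 'A'
            = (a + 1, 0, ra, if b > 2 then rb + (b - 2) else rb) := by simp [winnerStepA]
        rw [List.foldl_cons, hstep]
        obtain ⟨h1, h2⟩ := ih (a + 1) 0 ra (if b > 2 then rb + (b - 2) else rb)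
        refine ⟨?_, ?_⟩
        · rw [h1]
          have hw : wA ('A' :: t) a = (if 2 ≤ a then 1 else 0) + wA t (a + 1) := by simp [wA]
          rw [hw]; split_ifs <;> omega
        · rw [h2]
          have hw : wB ('A' :: t) b = wB t 0 := by simp [wB]
          rw [hw]; split_ifs at h2 ⊢ <;> omega
      · have hstep : winnerStepA (a, b, ra, rb) c
            = (0, b + 1, if a > 2 then ra + (a - 2) else ra, rb) := by simp [winnerStepA, h]
        rw [List.foldl_cons, hstep]
        obtain ⟨h1, h2⟩ := ih 0 (b + 1) (if a > 2 then ra + (a - 2) else ra) rb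
        refine ⟨?_, ?_⟩
        · rw [h1]
          have hw : wA (c :: t) a = wA t 0 := by simp [wA, h]
          rw [hw]; split_ifs <;> omega
        · rw [h2]
          have hw : wB (c :: t) b = (if 2 ≤ b then 1 else 0) + wB t (b + 1) := by simp [wB, h]
          rw [hw]; split_ifs <;> omega

-- context run-lengths encoded by the previous two characters
def cA (x y : Char) : Int := if y = 'A' then (if x = 'A' then 2 else 1) else 0
def cB (x y : Char) : Int := if y = 'A' then 0 else (if x = 'A' then 1 else 2)

theorem zip3_cons (x y c : Char) (t : List Char) :
    (((x :: y :: c :: t).zip ((x :: y :: c :: t).drop 1)).zip ((x :: y :: c :: t).drop 2))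
      = ((x, y), c) :: (((y :: c :: t).zip ((y :: c :: t).drop 1)).zip ((y :: c :: t).drop 2)) := by
  simp [List.zip]

theorem foldB_inv (t : List Char) : ∀ (x y : Char) (ra rb : Int),
    (((x :: y :: t).zip ((x :: y :: t).drop 1)).zip ((x :: y :: t).drop 2)).foldl winnerStepB (ra, rb)
      = (ra + wA t (cA x y), rb + wB t (cB x y)) := by
  induction t with
  | nil => intro x y ra rb; simp [wA, wB]
  | cons c t ih =>
      intro x y ra rb
      rw [zip3_cons, List.foldl_cons]
      have hA32 : wA t 3 = wA t 2 := wA_ge2 t 3 2 (by omega) (by omega)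
      have hB32 : wB t 3 = wB t 2 := wB_ge2 t 3 2 (by omega) (by omega)
      by_cases hx : x = 'A' <;> by_cases hy : y = 'A' <;> by_cases hc : c = 'A' <;>
        [ (have hstep : winnerStepB (ra, rb) ((x, y), c) = (ra + 1, rb) := by
             simp [winnerStepB, hx, hy, hc]);
          (have hstep : winnerStepB (ra, rb) ((x, y), c) = (ra, rb) := by
             simp [winnerStepB, hx, hy, hc]);
          (have hstep : winnerStepB (ra, rb) ((x, y), c) = (ra, rb) := by
             simp [winnerStepB, hx, hy, hc]);
          (have hstep : winnerStepB (ra, rb) ((x, y), c) = (ra, rb) := by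
             simp [winnerStepB, hx, hy, hc]);
          (have hstep : winnerStepB (ra, rb) ((x, y), c) = (ra, rb) := by
             simp [winnerStepB, hx, hy, hc]);
          (have hstep : winnerStepB (ra, rb) ((x, y), c) = (ra, rb) := by
             simp [winnerStepB, hx, hy, hc]);
          (have hstep : winnerStepB (ra, rb) ((x, y), c) = (ra, rb) := by
             simp [winnerStepB, hx, hy, hc]);
          (have hstep : winnerStepB (ra, rb) ((x, y), c) = (ra, rb + 1) := by
             simp [winnerStepB, hx, hy, hc]) ] <;>
        · rw [hstep, ih y c]
          simp [wA, wB, cA, cB, hx, hy, hc, hA32, hB32]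
          try omega

-- whole-string window counts from an empty context
theorem foldB_whole (l : List Char) :
    ((l.zip (l.drop 1)).zip (l.drop 2)).foldl winnerStepB (0, 0) = (wA l 0, wB l 0) := by
  match l with
  | [] => rfl
  | [x] => simp [wA, wB]
  | x :: y :: t =>
      rw [foldB_inv t x y 0 0]
      by_cases hx : x = 'A' <;> by_cases hy : y = 'A' <;>
        simp [wA, wB, cA, cB, hx, hy]

-- ===== VERDICT (by name: the statement is the Claim_ definition above) =====
theorem winner_of_game_spec : Claim_equal_winner_of_game := by
  intro colors _
  unfold Spec_winner_of_game
  obtain ⟨h1, h2⟩ := foldA_inv colors.toList 0 0 0 0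
  simp only [winner_of_game, winner_of_game_alt, foldB_whole]
  rw [decide_eq_decide]
  split_ifs <;> omega
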